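-- pv_equiv track=rewrite | github.com/XdarksyderX/ft_transcendence | chess/service/game/logic/utils.py | is_threefold_repetition
-- ===== SOURCE A (Python) =====
-- def is_threefold_repetition(game_history):
--     """
--     Verifica si hay repetición de posición tres veces.
--
--     Args:
--         game_history: Lista de cadenas FEN de la partida
--
--     Returns:
--         True si hay repetición triple, False en caso contrario
--     """
--     position_counts = {}
--     for fen in game_history:
--         # Considera solo la parte de la posición (antes del primer espacio)
--         position = fen.split(' ')[0]
--         position_counts[position] = position_counts.get(position, 0) + 1
--         if position_counts[position] >= 3:
--             return True
--     return False
-- ===== SOURCE B (Python) =====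
-- def is_threefold_repetition(game_history):
--     """
--     Verifica si hay repetición de posición tres veces.
--
--     Args:
--         game_history: Lista de cadenas FEN de la partida
--
--     Returns:
--         True si hay repetición triple, False en caso contrario
--     """
--     positions = sorted(fen.split(' ')[0] for fen in game_history)
--     # after sorting, equal positions are adjacent: a position occurs >= 3
--     # times iff some element equals the one two places further on
--     return any(a == c for a, c in zip(positions, positions[2:]))
-- ===== Notes on version B (the rewrite author's own statement) =====
-- stated objective: alternative
-- what changed: A's interleaved dict-counting loop with early return is replaced by sort-then-scan: sort the position fields so equal positions are adjacent, then check whether any element equals the one two places later (a distance-2 adjacent-equality scan), which holds iff some position occurs at least three times.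
import Mathlib
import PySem

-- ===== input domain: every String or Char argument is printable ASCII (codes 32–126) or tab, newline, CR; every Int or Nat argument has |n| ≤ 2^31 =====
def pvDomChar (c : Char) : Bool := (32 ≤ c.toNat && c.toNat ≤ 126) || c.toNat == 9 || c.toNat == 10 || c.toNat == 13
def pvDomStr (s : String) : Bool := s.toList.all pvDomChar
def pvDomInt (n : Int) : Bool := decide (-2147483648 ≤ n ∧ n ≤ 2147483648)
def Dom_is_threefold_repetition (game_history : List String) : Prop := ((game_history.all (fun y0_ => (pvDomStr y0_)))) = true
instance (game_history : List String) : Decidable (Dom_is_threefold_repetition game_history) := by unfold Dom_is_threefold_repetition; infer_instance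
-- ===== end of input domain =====

-- B replaces A's interleaved dict-count-with-early-return by sort-then-scan: sort the
-- position fields and test whether any element equals the one two places later; objective: alternative.

-- ===== PORT A =====
-- fen.split(' ')[0]: split with a nonempty separator always returns a nonempty list,
-- so the [0] index never raises; headD is exact here.
def pvPos (fen : String) : String := ((PySem.Str.split? fen " ").getD []).headD ""

def pvLoopA (d : PySem.Dict String Int) : List String → Bool
  | [] => false
  | fen :: rest =>
    let position := pvPos fen
    let d' := d.insert position (d.getD position 0 + 1)
    if 3 ≤ d'.getD position 0 then true else pvLoopA d' rest

def is_threefold_repetition (game_history : List String) : Bool :=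
  pvLoopA PySem.Dict.empty game_history

-- ===== PORT B =====
def is_threefold_repetition_alt (game_history : List String) : Bool :=
  let positions := PySem.List.sorted (game_history.map (fun fen => pvPos fen)) (fun x => x) false
  (positions.zip (PySem.List.slice positions (some 2) none)).any (fun p => p.1 == p.2)

-- ===== PRECONDITION & SPEC =====
def Spec_is_threefold_repetition (game_history : List String) (out : Bool) : Prop := out = is_threefold_repetition_alt game_history
instance (game_history : List String) (out : Bool) : Decidable (Spec_is_threefold_repetition game_history out) := by unfold Spec_is_threefold_repetition; infer_instance

-- ===== CLAIM (what is proved, stated in full; the proofs are below) =====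
def Claim_equal_is_threefold_repetition : Prop := ∀ (game_history : List String), Dom_is_threefold_repetition game_history → Spec_is_threefold_repetition game_history (is_threefold_repetition game_history)

-- ===== LEMMAS AND PROOFS =====

-- A's loop returns true iff some element's carried-in count plus its total count in the
-- remaining list reaches 3 (counts only grow, so the early return fires iff the total does).
lemma pvLoopA_iff (l : List String) : ∀ d : PySem.Dict String Int,
    pvLoopA d l = true ↔
      ∃ fen ∈ l, 3 ≤ d.getD (pvPos fen) 0 + ((l.map pvPos).count (pvPos fen) : Int) := by
  induction l with
  | nil => intro d; simp [pvLoopA]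
  | cons x rest ih =>
    intro d
    simp only [pvLoopA]
    by_cases h : 3 ≤ (d.insert (pvPos x) (d.getD (pvPos x) 0 + 1)).getD (pvPos x) 0
    · rw [if_pos h]
      rw [PySem.Dict.getD_insert_self] at h
      refine iff_of_true rfl ⟨x, List.mem_cons_self, ?_⟩
      rw [List.map_cons, List.count_cons_self]
      push_cast
      omega
    · rw [if_neg h, ih]
      rw [PySem.Dict.getD_insert_self] at h
      constructor
      · rintro ⟨fen, hfen, hle⟩
        refine ⟨fen, List.mem_cons_of_mem _ hfen, ?_⟩
        rw [PySem.Dict.getD_insert] at hle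
        rw [List.map_cons]
        by_cases he : pvPos fen = pvPos x
        · rw [if_pos he] at hle
          rw [he] at hle ⊢
          rw [List.count_cons_self]
          push_cast at hle ⊢
          omega
        · rw [if_neg he] at hle
          rw [List.count_cons_of_ne (Ne.symm he)]
          exact hle
      · rintro ⟨fen, hfen, hle⟩
        rw [List.map_cons] at hle
        rcases List.mem_cons.mp hfen with rfl | hfen'
        · rw [List.count_cons_self] at hle
          have h1 : 1 ≤ (rest.map pvPos).count (pvPos fen) := by
            by_contra hc
            have h0 : (rest.map pvPos).count (pvPos fen) = 0 := by omega
            rw [h0] at hle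
            push_cast at hle
            omega
          have hmem : pvPos fen ∈ rest.map pvPos := by
            rw [← List.count_pos_iff]; omega
          obtain ⟨fen', hfen', hpe⟩ := List.mem_map.mp hmem
          refine ⟨fen', hfen', ?_⟩
          rw [hpe, PySem.Dict.getD_insert_self]
          push_cast at hle ⊢
          omega
        · refine ⟨fen, hfen', ?_⟩
          rw [PySem.Dict.getD_insert]
          by_cases he : pvPos fen = pvPos x
          · rw [if_pos he]
            rw [he] at hle ⊢
            rw [List.count_cons_self] at hle
            push_cast at hle ⊢
            omega
          · rw [if_neg he]
            rw [List.count_cons_of_ne (Ne.symm he)] at hle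
            exact hle

-- On a ≤-sorted list, some element equals the one two places later iff some element
-- occurs at least three times.
lemma pvZipAny_iff (l : List String) (hs : l.Pairwise (· ≤ ·)) :
    ((l.zip (l.drop 2)).any (fun p => p.1 == p.2)) = true ↔ ∃ x ∈ l, 3 ≤ l.count x := by
  induction l with
  | nil => simp
  | cons a t ih =>
    match t, hs with
    | [], _ => simp
    | [b], _ =>
      refine iff_of_false (by simp) ?_
      rintro ⟨x, hx, hc⟩
      simp only [List.count_cons, List.count_nil] at hc
      split_ifs at hc <;> omega
    | b :: c :: r, hs =>
      have ha := List.pairwise_cons.mp hs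
      have hab : a ≤ b := ha.1 b (by simp)
      have hac : a ≤ c := ha.1 c (by simp)
      have ht := ha.2
      have hb := List.pairwise_cons.mp ht
      have hbc : b ≤ c := hb.1 c (by simp)
      have hc := List.pairwise_cons.mp hb.2
      have hcr : ∀ y ∈ r, c ≤ y := hc.1
      have hzip : (a :: b :: c :: r).zip ((a :: b :: c :: r).drop 2)
          = (a, c) :: ((b :: c :: r).zip ((b :: c :: r).drop 2)) := by
        simp [List.zip]
      rw [hzip]
      simp only [List.any_cons, Bool.or_eq_true, beq_iff_eq, ih ht]
      constructor
      · rintro (hacc | ⟨x, hx, hcnt⟩)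
        · refine ⟨a, by simp, ?_⟩
          have hba : b = a := (le_antisymm (hacc ▸ hbc) hab)
          simp [hba, ← hacc]
        · exact ⟨x, List.mem_cons_of_mem _ hx,
            le_trans hcnt ((List.sublist_cons_self a (b :: c :: r)).count_le x)⟩
      · rintro ⟨x, hx, hcnt⟩
        by_cases hxa : x = a
        · by_cases hxc : x = c
          · exact Or.inl (hxa.symm.trans hxc)
          · exfalso
            have hnr : x ∉ r := fun hr => hxc (le_antisymm (hxa ▸ hac) (hcr x hr))
            have h0 : r.count x = 0 := List.count_eq_zero.mpr hnr
            simp only [List.count_cons, h0, beq_iff_eq] at hcnt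
            split_ifs at hcnt with h1 h2 h3
            all_goals first
              | exact hxc h1.symm | exact hxc h2.symm | exact hxc h3.symm | omega
        · refine Or.inr ⟨x, ?_, ?_⟩
          · rcases List.mem_cons.mp hx with h | h
            · exact absurd h hxa
            · exact h
          · rwa [List.count_cons_of_ne (fun h => hxa h.symm)] at hcnt

-- ===== VERDICT (by name: the statement is the Claim_ definition above) =====
theorem is_threefold_repetition_spec : Claim_equal_is_threefold_repetition := by
  intro gh _
  unfold Spec_is_threefold_repetition is_threefold_repetition is_threefold_repetition_alt
  simp only []
  have h2 : ∀ xs : List String, PySem.List.slice xs (some 2) none = xs.drop 2 := by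
    intro xs
    have := PySem.List.slice_from_natCast (xs := xs) (a := 2)
    norm_num at this
    exact this
  rw [h2]
  have hsp := PySem.List.sorted_perm (gh.map (fun fen => pvPos fen)) (fun x => x) false
  rw [Bool.eq_iff_iff, pvLoopA_iff,
    pvZipAny_iff _ (by simpa using PySem.List.sorted_pairwise (gh.map (fun fen => pvPos fen)) (fun x => x))]
  simp only [PySem.Dict.getD_empty, zero_add]
  constructor
  · rintro ⟨fen, hfen, hd⟩
    refine ⟨pvPos fen, ?_, ?_⟩
    · exact (PySem.List.mem_sorted _ _ _ _).mpr (List.mem_map.mpr ⟨fen, hfen, rfl⟩)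
    · rw [hsp.count_eq]; exact_mod_cast hd
  · rintro ⟨p, hp, hc⟩
    obtain ⟨fen, hfen, hpe⟩ := List.mem_map.mp ((PySem.List.mem_sorted _ _ _ _).mp hp)
    refine ⟨fen, hfen, ?_⟩
    rw [hpe]
    rw [hsp.count_eq] at hc
    exact_mod_cast hc
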